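-- pv_equiv track=rewrite | github.com/helpingstar/algorithmstudy | python/Solved_Problem/BOJ_3986.py | check
-- ===== SOURCE A (Python) =====
-- from collections import deque
--
-- def check(string):
--     stack = deque()
--     for c in string:
--         if not stack:
--             stack.append(c)
--         else:
--             if stack[-1] == c:
--                 stack.pop()
--             else:
--                 stack.append(c)
--
--     if stack:
--         return False
--     else:
--         return True
-- ===== SOURCE B (Python) =====
-- def check(string):
--     s = string
--     while True:
--         found = -1
--         for i in range(len(s) - 1):
--             if s[i] == s[i + 1]:
--                 found = i
--                 break
--         if found < 0:
--             return s == ""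
--         s = s[:found] + s[found + 2:]
-- ===== Notes on version B (the rewrite author's own statement) =====
-- stated objective: alternative
-- what changed: Replaces the single stack pass with repeated rewriting: scan for the first adjacent equal pair, delete it, and loop until no pair remains; returns True iff the string reduced to empty (same normal form by confluence of xx->eps).
import Mathlib
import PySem

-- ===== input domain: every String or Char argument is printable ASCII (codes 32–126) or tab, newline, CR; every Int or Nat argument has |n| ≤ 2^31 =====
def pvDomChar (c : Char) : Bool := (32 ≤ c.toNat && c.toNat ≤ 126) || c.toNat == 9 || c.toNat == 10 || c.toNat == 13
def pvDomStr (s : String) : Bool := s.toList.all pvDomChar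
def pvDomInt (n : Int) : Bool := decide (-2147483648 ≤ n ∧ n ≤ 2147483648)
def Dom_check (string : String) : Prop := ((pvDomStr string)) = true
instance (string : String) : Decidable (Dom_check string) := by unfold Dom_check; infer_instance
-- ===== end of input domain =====

-- B replaces A's single stack pass by repeated deletion of the first adjacent equal
-- pair until none remains (objective: alternative algorithm, not faster).

-- ===== PORT A =====
-- The deque is modelled as a list with the TOP AT THE HEAD:
-- stack.append c ↔ c :: st, stack[-1] ↔ head, stack.pop() ↔ tail.
def stepA (st : List Char) (c : Char) : List Char :=
  match st with
  | [] => [c]                         -- if not stack: stack.append(c)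
  | t :: r => if t = c then r         -- elif stack[-1] == c: stack.pop()
              else c :: t :: r        -- else: stack.append(c)

def check (string : String) : Bool :=
  (string.toList.foldl stepA []).isEmpty   -- if stack: False else: True

-- ===== PORT B =====
-- inner `for i in range(len(s)-1)` scan: returns the string with the FIRST
-- adjacent equal pair deleted, or none when no such pair exists.
def findPair : List Char → Option (List Char)
  | [] => none
  | [_] => none
  | a :: b :: rest =>
      if a = b then some rest
      else (findPair (b :: rest)).map (a :: ·)

theorem findPair_length : ∀ (l l' : List Char), findPair l = some l' → l'.length < l.length := by
  intro l
  induction l with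
  | nil => intro l' h; simp [findPair] at h
  | cons a rest ih =>
    intro l' h
    match rest with
    | [] => simp [findPair] at h
    | b :: rest' =>
      by_cases hab : a = b
      · simp [findPair, hab] at h
        subst h; simp
      · simp [findPair, hab, Option.map_eq_some_iff] at h
        obtain ⟨m, hm, rfl⟩ := h
        have := ih m hm
        simpa using Nat.succ_lt_succ this

-- outer `while True` loop of B
def reduceLoop (l : List Char) : Bool :=
  match h : findPair l with
  | none => l.isEmpty                  -- return s == ""
  | some l' => reduceLoop l'           -- s = s[:found] + s[found+2:]
termination_by l.length
decreasing_by exact findPair_length _ _ h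

def check_alt (string : String) : Bool := reduceLoop string.toList

-- ===== PRECONDITION & SPEC =====
def Spec_check (string : String) (out : Bool) : Prop := out = check_alt string
instance (string : String) (out : Bool) : Decidable (Spec_check string out) := by unfold Spec_check; infer_instance

-- ===== CLAIM (what is proved, stated in full; the proofs are below) =====
def Claim_equal_check : Prop := ∀ (string : String), Dom_check string → Spec_check string (check string)

-- ===== LEMMAS AND PROOFS =====

-- A's stack never has two equal adjacent elements.
theorem stepA_chain {st : List Char} (c : Char)
    (h : List.IsChain (· ≠ ·) st) : List.IsChain (· ≠ ·) (stepA st c) := by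
  match st with
  | [] => simp [stepA]
  | t :: r =>
    by_cases htc : t = c
    · simpa [stepA, htc] using h.of_cons
    · simpa [stepA, htc] using ⟨Ne.symm htc, h⟩

-- Processing two equal characters in a row leaves a duplicate-free stack unchanged.
theorem stepA_cancel {st : List Char} (c : Char)
    (h : List.IsChain (· ≠ ·) st) : stepA (stepA st c) c = st := by
  match st with
  | [] => simp [stepA]
  | t :: r =>
    by_cases htc : t = c
    · subst htc
      match r with
      | [] => simp [stepA]
      | t' :: r' =>
        have : t ≠ t' := (List.isChain_cons_cons.mp h).1
        simp [stepA, Ne.symm this]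
    · simp [stepA, htc]

-- Deleting the first adjacent equal pair does not change A's final stack.
theorem findPair_foldl : ∀ (l l' : List Char), findPair l = some l' →
    ∀ st : List Char, List.IsChain (· ≠ ·) st →
      l.foldl stepA st = l'.foldl stepA st := by
  intro l
  induction l with
  | nil => intro l' h; simp [findPair] at h
  | cons a rest ih =>
    intro l' h st hst
    match rest with
    | [] => simp [findPair] at h
    | b :: rest' =>
      by_cases hab : a = b
      · simp [findPair, hab] at h
        subst h; subst hab
        simp [List.foldl, stepA_cancel a hst]
      · simp [findPair, hab, Option.map_eq_some_iff] at h
        obtain ⟨m, hm, rfl⟩ := h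
        simpa [List.foldl] using ih m hm (stepA st a) (stepA_chain a hst)

-- With no adjacent equal pair the string itself has no duplicates next to each other.
theorem findPair_none_chain : ∀ (l : List Char), findPair l = none →
    List.IsChain (· ≠ ·) l := by
  intro l
  induction l with
  | nil => intro _; simp
  | cons a rest ih =>
    intro h
    match rest with
    | [] => simp
    | b :: rest' =>
      by_cases hab : a = b
      · simp [findPair, hab] at h
      · simp [findPair, hab] at h
        exact List.isChain_cons_cons.mpr ⟨hab, ih h⟩

-- On a pair-free string A's stack pass just pushes every character.
theorem chain_foldl : ∀ (l st : List Char), List.IsChain (· ≠ ·) l →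
    (∀ t c, st.head? = some t → l.head? = some c → t ≠ c) →
    l.foldl stepA st = l.reverse ++ st := by
  intro l
  induction l with
  | nil => intro st _ _; simp
  | cons c rest ih =>
    intro st hc hhd
    have hstep : stepA st c = c :: st := by
      match st with
      | [] => simp [stepA]
      | t :: r =>
        have : t ≠ c := hhd t c rfl rfl
        simp [stepA, this]
    have hrest : rest.foldl stepA (c :: st) = rest.reverse ++ (c :: st) := by
      refine ih (c :: st) hc.of_cons ?_
      intro t c' ht hc'
      simp at ht; subst ht
      match rest, hc' with
      | c' :: rest', rfl => exact (List.isChain_cons_cons.mp hc).1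
    simp [List.foldl, hstep, hrest]

-- B's loop computes the emptiness of A's final stack.
theorem reduceLoop_eq : ∀ (l : List Char), reduceLoop l = (l.foldl stepA []).isEmpty := by
  intro l
  induction l using reduceLoop.induct with
  | case1 l h =>
    rw [reduceLoop.eq_def]
    split
    · have hchain := findPair_none_chain l h
      have := chain_foldl l [] hchain (by intro t c ht; simp at ht)
      simp [this]
    · next m hm => rw [h] at hm; exact absurd hm (by simp)
  | case2 l l' h ih =>
    rw [reduceLoop.eq_def]
    split
    · next hn => rw [h] at hn; exact absurd hn (by simp)
    · next m hm =>
      rw [h] at hm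
      cases hm
      rw [ih, findPair_foldl l l' h [] (by simp)]

-- ===== VERDICT (by name: the statement is the Claim_ definition above) =====
theorem check_spec : Claim_equal_check := by
  intro s _
  unfold Spec_check check check_alt
  exact (reduceLoop_eq s.toList).symm
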